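-- pv_equiv track=rewrite | github.com/mmmuae/FastJLP | orch.py | build_intervals_from_claimed
-- ===== SOURCE A (Python) =====
-- from typing import Dict, List, Optional, Tuple, Iterable
--
-- def build_intervals_from_claimed(N: int, claimed_idx_sorted: List[int]) -> List[Tuple[int,int,int]]:
--     if N <= 0: return []
--     if not claimed_idx_sorted: return [(N, 0, N-1)]
--     spans: List[Tuple[int,int,int]] = []
--     if claimed_idx_sorted[0] > 0:
--         spans.append((claimed_idx_sorted[0], 0, claimed_idx_sorted[0]-1))
--     for i in range(len(claimed_idx_sorted)-1):
--         a, b = claimed_idx_sorted[i], claimed_idx_sorted[i+1]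
--         if b > a + 1:
--             spans.append((b - a - 1, a+1, b-1))
--     if claimed_idx_sorted[-1] < N-1:
--         spans.append((N-1 - claimed_idx_sorted[-1], claimed_idx_sorted[-1]+1, N-1))
--     return spans
-- ===== SOURCE B (Python) =====
-- def build_intervals_from_claimed(N, claimed_idx_sorted):
--     if N <= 0:
--         return []
--     spans_rev = []
--     nxt = N  # right sentinel: the loop sees the claimed indices right-to-left
--     for x in reversed(claimed_idx_sorted):
--         if nxt > x + 1:
--             spans_rev.append((nxt - x - 1, x + 1, nxt - 1))
--         nxt = x
--     if nxt > 0: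
--         spans_rev.append((nxt, 0, nxt - 1))
--     return spans_rev[::-1]
-- ===== Notes on version B (the rewrite author's own statement) =====
-- stated objective: alternative
-- what changed: B traverses the claimed indices right-to-left carrying the following boundary (seeded with N), records each gap into a reversed buffer and reverses once at the end, so the trailing gap falls out of the sentinel and only the leading gap needs a final check, instead of A's left-to-right index loop with separate leading- and trailing-gap appends.
import Mathlib
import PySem

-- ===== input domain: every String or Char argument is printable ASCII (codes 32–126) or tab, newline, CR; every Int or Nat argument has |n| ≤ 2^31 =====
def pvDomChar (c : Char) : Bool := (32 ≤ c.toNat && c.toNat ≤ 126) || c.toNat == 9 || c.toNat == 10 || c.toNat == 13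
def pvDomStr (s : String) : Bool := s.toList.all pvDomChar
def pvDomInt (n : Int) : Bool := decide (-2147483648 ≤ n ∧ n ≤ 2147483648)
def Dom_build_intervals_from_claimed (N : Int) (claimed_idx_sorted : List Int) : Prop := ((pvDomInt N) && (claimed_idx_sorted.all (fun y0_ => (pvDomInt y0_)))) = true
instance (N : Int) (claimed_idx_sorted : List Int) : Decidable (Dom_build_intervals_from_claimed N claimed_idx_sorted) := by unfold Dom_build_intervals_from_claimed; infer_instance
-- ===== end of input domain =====

-- B traverses the claimed indices right-to-left carrying the following boundary (seeded with N)
-- and builds the output back-to-front via a reversed buffer; alternative decomposition, same cost.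


-- ===== PORT A =====
def build_intervals_from_claimed (N : Int) (claimed_idx_sorted : List Int) : List (Int × Int × Int) :=
  if N ≤ 0 then []
  else
    match claimed_idx_sorted with
    | [] => [(N, 0, N - 1)]
    | c0 :: rest =>
      let cs := c0 :: rest
      -- if claimed_idx_sorted[0] > 0: spans.append(...)
      let spans : List (Int × Int × Int) :=
        if c0 > 0 then [(c0, 0, c0 - 1)] else []
      -- for i in range(len(claimed_idx_sorted)-1): a, b = cs[i], cs[i+1]; if b > a+1: append
      let spans := (PySem.List.pyRange 0 ((cs.length : Int) - 1) 1).foldl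
        (fun sp i =>
          let a := PySem.List.pyGetD cs i 0
          let b := PySem.List.pyGetD cs (i + 1) 0
          if b > a + 1 then sp ++ [(b - a - 1, a + 1, b - 1)] else sp) spans
      -- if claimed_idx_sorted[-1] < N-1: spans.append(...)
      let last := PySem.List.pyGetD cs (-1) 0
      if last < N - 1 then spans ++ [(N - 1 - last, last + 1, N - 1)] else spans

-- ===== PORT B =====
def build_intervals_from_claimed_alt (N : Int) (claimed_idx_sorted : List Int) : List (Int × Int × Int) :=
  if N ≤ 0 then []
  else
    -- for x in reversed(claimed_idx_sorted): maybe record the gap below nxt; nxt = x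
    let st := claimed_idx_sorted.reverse.foldl
      (fun (p : List (Int × Int × Int) × Int) x =>
        (if p.2 > x + 1 then p.1 ++ [(p.2 - x - 1, x + 1, p.2 - 1)] else p.1, x))
      ([], N)
    -- if nxt > 0: record the leading gap; spans_rev[::-1]
    (if st.2 > 0 then st.1 ++ [(st.2, 0, st.2 - 1)] else st.1).reverse

-- ===== PRECONDITION & SPEC =====
def Spec_build_intervals_from_claimed (N : Int) (claimed_idx_sorted : List Int) (out : List (Int × Int × Int)) : Prop := out = build_intervals_from_claimed_alt N claimed_idx_sorted
instance (N : Int) (claimed_idx_sorted : List Int) (out : List (Int × Int × Int)) : Decidable (Spec_build_intervals_from_claimed N claimed_idx_sorted out) := by unfold Spec_build_intervals_from_claimed; infer_instance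

-- ===== CLAIM (what is proved, stated in full; the proofs are below) =====
def Claim_equal_build_intervals_from_claimed : Prop := ∀ (N : Int) (claimed_idx_sorted : List Int), Dom_build_intervals_from_claimed N claimed_idx_sorted → Spec_build_intervals_from_claimed N claimed_idx_sorted (build_intervals_from_claimed N claimed_idx_sorted)

-- ===== LEMMAS AND PROOFS =====

-- common reference form: the gap one pair of consecutive boundaries contributes
def pvGap (p : Int × Int) : Option (Int × Int × Int) :=
  if p.2 > p.1 + 1 then some (p.2 - p.1 - 1, p.1 + 1, p.2 - 1) else none

-- A's interior loop body, on Nat indices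
def pvStep (cs : List Int) (sp : List (Int × Int × Int)) (k : Nat) : List (Int × Int × Int) :=
  if cs.getD (k + 1) 0 > cs.getD k 0 + 1 then
    sp ++ [(cs.getD (k + 1) 0 - cs.getD k 0 - 1, cs.getD k 0 + 1, cs.getD (k + 1) 0 - 1)]
  else sp

theorem pvStep_cons (x : Int) (cs : List Int) (sp : List (Int × Int × Int)) (k : Nat) :
    pvStep (x :: cs) sp (k + 1) = pvStep cs sp k := by
  simp [pvStep]

-- A's interior loop collects exactly the gaps of consecutive pairs of cs
theorem pv_mid_loop (cs : List Int) (init : List (Int × Int × Int)) :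
    (List.range (cs.length - 1)).foldl (pvStep cs) init
      = init ++ (cs.zip cs.tail).filterMap pvGap := by
  induction cs generalizing init with
  | nil => simp
  | cons x t ih =>
    cases t with
    | nil => simp
    | cons y t' =>
      have hlen : (x :: y :: t').length - 1 = (y :: t').length - 1 + 1 := by simp
      rw [hlen, List.range_succ_eq_map, List.foldl_cons, List.foldl_map]
      have hfun : (fun sp k => pvStep (x :: y :: t') sp (k + 1)) = pvStep (y :: t') := by
        funext sp k; exact pvStep_cons x (y :: t') sp k
      rw [hfun, ih]
      by_cases h : y > x + 1 <;>
        simp [pvStep, pvGap, h, List.append_assoc]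

-- zipping a list extended by a sentinel on the right
theorem pv_zip_snoc (cs : List Int) (hne : cs ≠ []) (N : Int) :
    (cs ++ [N]).zip ((cs ++ [N]).tail)
      = cs.zip cs.tail ++ [(cs.getLast hne, N)] := by
  induction cs with
  | nil => simp at hne
  | cons x t ih =>
    cases t with
    | nil => simp
    | cons y t' =>
      have h := ih (by simp)
      simp only [List.cons_append, List.zip_cons_cons, List.tail_cons] at h ⊢
      rw [h]
      simp [List.getLast]

-- A equals the filterMap of pvGap over the sentinel pairing (-1 :: cs ++ [N]) with its tail
theorem pv_A_eq_sentinel (N : Int) (cs : List Int) :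
    build_intervals_from_claimed N cs
      = if N ≤ 0 then []
        else ((-1 :: (cs ++ [N])).zip (cs ++ [N])).filterMap pvGap := by
  by_cases hN : N ≤ 0
  · simp [build_intervals_from_claimed, hN]
  · cases cs with
    | nil =>
      simp [build_intervals_from_claimed, hN, pvGap, show (0:Int) < N by omega]
    | cons c0 rest =>
      have hne : (c0 :: rest) ≠ [] := by simp
      simp only [build_intervals_from_claimed, hN, if_false,
        List.cons_append, List.zip_cons_cons]
      have hrange : PySem.List.pyRange 0 (((c0 :: rest).length : Int) - 1) 1
          = (List.range rest.length).map (fun (k : Nat) => (k : Int)) := by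
        rw [PySem.List.pyRange_one]
        have h3 : ((((c0 :: rest).length : Int) - 1) - 0).toNat = rest.length := by
          simp only [List.length_cons]
          push_cast
          omega
        rw [h3]
        simp
      have hfun : (fun (sp : List (Int × Int × Int)) (k : Nat) =>
          let a := PySem.List.pyGetD (c0 :: rest) ((k : Int)) 0
          let b := PySem.List.pyGetD (c0 :: rest) ((k : Int) + 1) 0
          if b > a + 1 then sp ++ [(b - a - 1, a + 1, b - 1)] else sp)
          = pvStep (c0 :: rest) := by
        funext sp k
        have h1 : ((k : Int) + 1) = ((k + 1 : Nat) : Int) := by push_cast; ring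
        simp only [h1, PySem.List.pyGetD_natCast, pvStep]
      have hfold : ∀ (init : List (Int × Int × Int)),
          (PySem.List.pyRange 0 (((c0 :: rest).length : Int) - 1) 1).foldl
            (fun sp i =>
              let a := PySem.List.pyGetD (c0 :: rest) i 0
              let b := PySem.List.pyGetD (c0 :: rest) (i + 1) 0
              if b > a + 1 then sp ++ [(b - a - 1, a + 1, b - 1)] else sp) init
          = init ++ ((c0 :: rest).zip rest).filterMap pvGap := by
        intro init
        rw [hrange, List.foldl_map, hfun]
        simpa using pv_mid_loop (c0 :: rest) init
      rw [hfold]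
      have hneg : PySem.List.pyGetD (c0 :: rest) (-1) 0 = (c0 :: rest).getLast hne := by
        simp [pysem]
        exact (List.getLast_eq_getElem hne).symm
      rw [hneg]
      have hzip := pv_zip_snoc (c0 :: rest) hne N
      simp only [List.cons_append, List.tail_cons] at hzip
      rw [hzip]
      set L := (c0 :: rest).getLast hne with hL
      have g1 : pvGap (-1, c0) = if c0 > 0 then some (c0, 0, c0 - 1) else none := by
        by_cases h : c0 > 0
        · rw [pvGap, if_pos (by omega), if_pos h]
          norm_num
        · rw [pvGap, if_neg (by omega), if_neg h]
      have g2 : pvGap (L, N) = if L < N - 1 then some (N - 1 - L, L + 1, N - 1) else none := by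
        by_cases h : L < N - 1
        · rw [pvGap, if_pos (by omega), if_pos h]
          norm_num
          ring
        · rw [pvGap, if_neg (by omega), if_neg h]
      rw [List.filterMap_cons, g1, List.filterMap_append, List.filterMap_cons,
        List.filterMap_nil, g2]
      split_ifs <;> simp

-- the sentinel zip drops its overlong left argument's last element
theorem pv_zip_trunc (x : Int) (cs : List Int) (N : Int) :
    (x :: (cs ++ [N])).zip (cs ++ [N]) = (x :: cs).zip (cs ++ [N]) := by
  induction cs generalizing x with
  | nil => simp
  | cons d t ih =>
    simp only [List.cons_append, List.zip_cons_cons]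
    rw [ih d]

-- B's right-to-left fold computes the head of cs ++ [N] and the gaps of consecutive pairs
theorem pv_B_fold (cs : List Int) (N : Int) (acc : List (Int × Int × Int)) :
    cs.foldr
      (fun x (p : List (Int × Int × Int) × Int) =>
        (if p.2 > x + 1 then p.1 ++ [(p.2 - x - 1, x + 1, p.2 - 1)] else p.1, x))
      (acc, N)
    = (acc ++ ((cs.zip (cs.tail ++ [N])).filterMap pvGap).reverse, cs.headD N) := by
  induction cs with
  | nil => simp
  | cons c t ih =>
    rw [List.foldr_cons, ih]
    cases t with
    | nil => by_cases h : N > c + 1 <;> simp [pvGap, h]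
    | cons d t' => by_cases h : d > c + 1 <;> simp [pvGap, h, List.append_assoc]

-- ===== VERDICT (by name: the statement is the Claim_ definition above) =====
theorem build_intervals_from_claimed_spec : Claim_equal_build_intervals_from_claimed := by
  intro N cs _
  show build_intervals_from_claimed N cs = build_intervals_from_claimed_alt N cs
  rw [pv_A_eq_sentinel]
  by_cases hN : N ≤ 0
  · simp [build_intervals_from_claimed_alt, hN]
  · simp only [build_intervals_from_claimed_alt, hN, if_false]
    rw [List.foldl_reverse]
    have hfold := pv_B_fold cs N []
    have hstep : (fun (x : Int) (p : List (Int × Int × Int) × Int) =>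
        (if p.2 > x + 1 then p.1 ++ [(p.2 - x - 1, x + 1, p.2 - 1)] else p.1, x))
        = (fun x y => (fun (p : List (Int × Int × Int) × Int) (x : Int) =>
            (if p.2 > x + 1 then p.1 ++ [(p.2 - x - 1, x + 1, p.2 - 1)] else p.1, x)) y x) := by
      rfl
    rw [← hstep, hfold]
    rw [pv_zip_trunc]
    cases cs with
    | nil =>
      simp only [List.nil_append, List.zip_cons_cons, List.zip_nil_right,
        List.filterMap_cons, List.filterMap_nil]
      have : pvGap (-1, N) = some (N, 0, N - 1) := by
        rw [pvGap, if_pos (by omega)]; norm_num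
      rw [this]
      simp [show (0:Int) < N by omega]
    | cons d t =>
      simp only [List.cons_append, List.zip_cons_cons, List.filterMap_cons, List.tail_cons,
        List.headD_cons, List.nil_append]
      have : pvGap (-1, d) = if d > 0 then some (d, 0, d - 1) else none := by
        by_cases h : d > 0
        · rw [pvGap, if_pos (by omega), if_pos h]; norm_num
        · rw [pvGap, if_neg (by omega), if_neg h]
      rw [this]
      split_ifs <;> simp
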